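-- pv_equiv track=rewrite | github.com/LennartElbe/codeEvo | StudentProblem/10.21.11.41/1/1569575319.py | word_count_iter
-- ===== SOURCE A (Python) =====
-- import string
--
-- def nwords(s: str) -> int:
--     """Function counts words in string. Words are separated with element from string.whitespace.
--        Counter is at the beginning 1, because there is for sure one word in string, otherwise zero
--        is returned.
--     """
--     if s == '':
--         return 0
--     res = 1
--     for i in s:
--         if i in string.whitespace:
--             res += 1
--     return res
--
-- def word_count_iter(it) -> tuple:
--     """returns tuple containing numbers of rows, words and all elements."""
--     if it == "":
--         return (0, 0, 0)
--     rows = 1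
--     words = 0
--     elements = 0
--     for i in it:
--         elements += 1
--     for row in it:
--         rows +=1
--     words = nwords(it)
--     return (rows, words, elements)
-- ===== SOURCE B (Python) =====
-- import string
--
-- def word_count_iter(it) -> tuple:
--     """returns tuple containing numbers of rows, words and all elements."""
--     if it == "":
--         return (0, 0, 0)
--     n = len(it)
--     w = sum(1 for c in it if c in string.whitespace)
--     return (n + 1, w + 1, n)
-- ===== Notes on version B (the rewrite author's own statement) =====
-- stated objective: simpler
-- what changed: Replaces A's two counting loops plus the nwords helper pass by a closed form: len(it) for elements, len+1 for rows, and one whitespace count plus 1 for words.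
import Mathlib
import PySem

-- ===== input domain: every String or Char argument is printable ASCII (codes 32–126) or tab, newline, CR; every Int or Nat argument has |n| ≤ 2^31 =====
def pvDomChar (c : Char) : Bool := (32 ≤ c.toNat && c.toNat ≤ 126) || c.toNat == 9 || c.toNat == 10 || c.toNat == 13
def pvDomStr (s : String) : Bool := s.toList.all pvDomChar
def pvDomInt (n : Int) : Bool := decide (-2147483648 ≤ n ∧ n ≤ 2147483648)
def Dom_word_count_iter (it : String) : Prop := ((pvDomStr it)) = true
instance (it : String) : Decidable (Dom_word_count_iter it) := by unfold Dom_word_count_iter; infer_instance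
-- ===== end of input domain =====

-- B replaces A's two counting loops and the nwords helper pass by a closed form
-- (len, whitespace count) with the same +1 offsets; objective: simpler.


-- ===== PORT A =====
-- membership test `c in string.whitespace` (' \t\n\r\v\f')
def pyIsWs (c : Char) : Bool :=
  c = ' ' || c = '\t' || c = '\n' || c = '\r' || c = '\x0b' || c = '\x0c'

-- helper nwords, transliterated
def nwords (s : String) : Int :=
  if s = "" then 0
  else s.toList.foldl (fun res i => if pyIsWs i then res + 1 else res) 1

def word_count_iter (it : String) : Int × Int × Int :=
  if it = "" then (0, 0, 0)
  else
    let elements : Int := it.toList.foldl (fun e _ => e + 1) 0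
    let rows : Int := it.toList.foldl (fun r _ => r + 1) 1
    let words : Int := nwords it
    (rows, words, elements)

-- ===== PORT B =====
def word_count_iter_alt (it : String) : Int × Int × Int :=
  if it = "" then (0, 0, 0)
  else
    let n : Int := it.toList.length
    let w : Int := (it.toList.countP pyIsWs : Nat)
    (n + 1, w + 1, n)

-- ===== PRECONDITION & SPEC =====
def Spec_word_count_iter (it : String) (out : Int × Int × Int) : Prop := out = word_count_iter_alt it
instance (it : String) (out : Int × Int × Int) : Decidable (Spec_word_count_iter it out) := by unfold Spec_word_count_iter; infer_instance

-- ===== CLAIM (what is proved, stated in full; the proofs are below) =====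
def Claim_equal_word_count_iter : Prop := ∀ (it : String), Dom_word_count_iter it → Spec_word_count_iter it (word_count_iter it)

-- ===== LEMMAS AND PROOFS =====
theorem foldl_len (l : List Char) (acc : Int) :
    l.foldl (fun r (_ : Char) => r + 1) acc = acc + l.length := by
  induction l generalizing acc with
  | nil => simp
  | cons c t ih => simp [List.foldl, ih]; omega

theorem foldl_countP (l : List Char) (acc : Int) :
    l.foldl (fun res i => if pyIsWs i then res + 1 else res) acc
      = acc + (l.countP pyIsWs : Nat) := by
  induction l generalizing acc with
  | nil => simp
  | cons c t ih =>
    simp only [List.foldl, List.countP_cons, ih]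
    by_cases h : pyIsWs c <;> simp [h] <;> try omega

-- ===== VERDICT (by name: the statement is the Claim_ definition above) =====
theorem word_count_iter_spec : Claim_equal_word_count_iter := by
  intro it _
  unfold Spec_word_count_iter word_count_iter word_count_iter_alt nwords
  by_cases h : it = ""
  · simp [h]
  · simp [h, foldl_len, foldl_countP]; omega
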